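-- pv_equiv track=rewrite | github.com/BolachinhaAmericana/FinalBioinformaticsProject | scripts/fasta_to_Nexus.py | getCorrectSeq
-- ===== SOURCE A (Python) =====
-- def getCorrectSeq(seqList):
--
-- 	'''
--     What for
-- 	Get only the wanted seqs
--
--     Arguments:
--         seqList
--
--     Vars -
--         correct_seq: list with the wanted seqs
--
--     Returns:
--         correct_seq
--     '''
--
-- 	correct_seq =[]
-- 	curr_seq = ''
-- 	for i in range(len(seqList)):
-- 		curr_seq = curr_seq + seqList[i]
-- 		if len(seqList[i]) <= 59:
-- 			correct_seq.append(curr_seq)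
-- 			curr_seq = ''
-- 			continue
-- 	return correct_seq
-- ===== SOURCE B (Python) =====
-- def getCorrectSeq(seqList):
--     bounds = [i for i, s in enumerate(seqList) if len(s) <= 59]
--     correct_seq = []
--     prev = -1
--     for b in bounds:
--         correct_seq.append(''.join(seqList[prev + 1:b + 1]))
--         prev = b
--     return correct_seq
-- ===== Notes on version B (the rewrite author's own statement) =====
-- stated objective: alternative
-- what changed: Instead of threading a running curr_seq accumulator through one scan, B first computes the boundary indices (lines of length <= 59) and then forms each group by slicing the input between consecutive boundaries and joining the slice.
import Mathlib
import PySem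

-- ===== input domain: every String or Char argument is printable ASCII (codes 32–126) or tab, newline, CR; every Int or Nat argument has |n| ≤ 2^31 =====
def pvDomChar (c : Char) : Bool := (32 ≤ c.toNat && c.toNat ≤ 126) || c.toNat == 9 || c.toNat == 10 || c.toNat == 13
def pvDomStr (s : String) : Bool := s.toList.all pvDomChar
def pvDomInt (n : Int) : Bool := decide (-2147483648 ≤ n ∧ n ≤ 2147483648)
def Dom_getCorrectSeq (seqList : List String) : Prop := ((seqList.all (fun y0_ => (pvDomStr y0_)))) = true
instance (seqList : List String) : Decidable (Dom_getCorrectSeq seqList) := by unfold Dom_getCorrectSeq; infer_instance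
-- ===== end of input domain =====

-- B groups the FASTA lines by precomputing the boundary indices (lines of length <= 59) and then
-- slicing-and-joining between consecutive boundaries, instead of threading a running accumulator
-- string through one scan (alternative decomposition, same asymptotic cost).

-- ===== PORT A =====
def getCorrectSeq (seqList : List String) : List String :=
  ((PySem.List.pyRange 0 (PySem.List.len seqList) 1).foldl
    (fun (st : List String × String) i =>
      let curr := st.2 ++ PySem.List.pyGetD seqList i ""
      if PySem.Str.len (PySem.List.pyGetD seqList i "") ≤ 59 then
        (st.1 ++ [curr], "")
      else
        (st.1, curr))
    ([], "")).1

-- ===== PORT B =====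
def getCorrectSeq_alt (seqList : List String) : List String :=
  let bounds := ((PySem.List.enumerate seqList 0).filter
      (fun p => decide (PySem.Str.len p.2 ≤ 59))).map (·.1)
  (bounds.foldl
    (fun (st : List String × Int) b =>
      (st.1 ++ [PySem.Str.join "" (PySem.List.slice seqList (some (st.2 + 1)) (some (b + 1)))], b))
    ([], -1)).1

-- ===== PRECONDITION & SPEC =====
def Spec_getCorrectSeq (seqList : List String) (out : List String) : Prop := out = getCorrectSeq_alt seqList
instance (seqList : List String) (out : List String) : Decidable (Spec_getCorrectSeq seqList out) := by unfold Spec_getCorrectSeq; infer_instance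

-- ===== CLAIM (what is proved, stated in full; the proofs are below) =====
def Claim_equal_getCorrectSeq : Prop := ∀ (seqList : List String), Dom_getCorrectSeq seqList → Spec_getCorrectSeq seqList (getCorrectSeq seqList)

-- ===== LEMMAS AND PROOFS =====

-- reference function: the groups, by structural recursion on the list of lines
def pvG : List String → List String
  | [] => []
  | x :: xs =>
    if PySem.Str.len x ≤ 59 then x :: pvG xs
    else
      match pvG xs with
      | [] => []
      | g :: gs => (x ++ g) :: gs

-- prefix the pending accumulator onto the first group
def pvPC (cur : String) : List String → List String
  | [] => []
  | g :: gs => (cur ++ g) :: gs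

theorem pv_append_assoc (a b c : String) : a ++ b ++ c = a ++ (b ++ c) := by
  apply String.ext; simp

theorem pv_join_nil : PySem.Str.join "" ([] : List String) = "" := by
  apply String.ext
  simp [PySem.Str.toList_join, PySem.Chars.join_nil]

theorem pv_join_cons (x : String) (l : List String) :
    PySem.Str.join "" (x :: l) = x ++ PySem.Str.join "" l := by
  apply String.ext
  cases l with
  | nil => simp [PySem.Str.toList_join, PySem.Chars.join_singleton, PySem.Chars.join_nil]
  | cons y l => simp [PySem.Str.toList_join, PySem.Chars.join_cons_cons]

theorem pv_join_singleton (x : String) : PySem.Str.join "" [x] = x := by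
  rw [pv_join_cons, pv_join_nil]
  apply String.ext; simp

theorem pvPC_empty (l : List String) : pvPC "" l = l := by
  cases l with
  | nil => rfl
  | cons g gs => simp [pvPC]

-- A's step function (after removing the index through foldl_pyRange_zero_pyGetD)
def pvStepA (st : List String × String) (s : String) : List String × String :=
  if PySem.Str.len s ≤ 59 then (st.1 ++ [st.2 ++ s], "") else (st.1, st.2 ++ s)

theorem pv_foldA (xs : List String) (out : List String) (cur : String) :
    (xs.foldl pvStepA (out, cur)).1 = out ++ pvPC cur (pvG xs) := by
  induction xs generalizing out cur with
  | nil => simp [pvG, pvPC]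
  | cons x xs ih =>
    simp only [List.foldl_cons, pvStepA, pvG]
    by_cases h : PySem.Str.len x ≤ 59
    · rw [if_pos h, if_pos h, ih, pvPC_empty]
      simp [pvPC]
    · rw [if_neg h, if_neg h, ih]
      cases hg : pvG xs with
      | nil => simp [pvPC]
      | cons g gs => simp [pvPC, pv_append_assoc]

theorem pv_A_eq_G (xs : List String) : getCorrectSeq xs = pvG xs := by
  unfold getCorrectSeq
  rw [PySem.List.foldl_pyRange_zero_pyGetD xs ""
      (fun (st : List String × String) s =>
        if PySem.Str.len s ≤ 59 then (st.1 ++ [st.2 ++ s], "") else (st.1, st.2 ++ s))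
      ([], "")]
  rw [show (List.foldl (fun (st : List String × String) s =>
        if PySem.Str.len s ≤ 59 then (st.1 ++ [st.2 ++ s], "") else (st.1, st.2 ++ s)) ([], "") xs)
      = List.foldl pvStepA ([], "") xs from rfl]
  rw [pv_foldA, pvPC_empty]
  simp

-- B's step function and boundary list
def pvStepB (ys : List String) (st : List String × Int) (b : Int) : List String × Int :=
  (st.1 ++ [PySem.Str.join "" (PySem.List.slice ys (some (st.2 + 1)) (some (b + 1)))], b)

def pvBnds (xs : List String) (s : Int) : List Int :=
  ((PySem.List.enumerate xs s).filter (fun p => decide (PySem.Str.len p.2 ≤ 59))).map (·.1)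

theorem pvBnds_cons (x : String) (xs : List String) (s : Int) :
    pvBnds (x :: xs) s
      = (if PySem.Str.len x ≤ 59 then [s] else []) ++ pvBnds xs (s + 1) := by
  by_cases h : x.length ≤ 59
  · simp [pvBnds, PySem.List.enumerate_cons, h]
  · simp [pvBnds, PySem.List.enumerate_cons, h]

theorem pvBnds_shift (xs : List String) (s : Int) :
    pvBnds xs (s + 1) = (pvBnds xs s).map (· + 1) := by
  induction xs generalizing s with
  | nil => rfl
  | cons x xs ih =>
    rw [pvBnds_cons x xs (s + 1), pvBnds_cons x xs s, ih (s + 1)]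
    by_cases h : x.length ≤ 59
    · simp [h]
    · simp [h]

theorem pvBnds_nonneg (xs : List String) (s : Int) (b : Int) (hb : b ∈ pvBnds xs s) : s ≤ b := by
  simp only [pvBnds, List.mem_map, List.mem_filter] at hb
  obtain ⟨p, ⟨hmem, _⟩, rfl⟩ := hb
  rw [PySem.List.mem_enumerate_iff] at hmem
  obtain ⟨k, _, rfl⟩ := hmem
  omega

theorem pv_foldB_acc (ys : List String) (bs : List Int) (acc : List String) (p : Int) :
    (bs.foldl (pvStepB ys) (acc, p)).1 = acc ++ (bs.foldl (pvStepB ys) ([], p)).1 := by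
  induction bs generalizing acc p with
  | nil => simp
  | cons b bs ih =>
    simp only [List.foldl_cons, pvStepB, List.nil_append]
    rw [ih, ih [PySem.Str.join "" (PySem.List.slice ys (some (p + 1)) (some (b + 1)))] b]
    simp

theorem pv_sliceShift (x : String) (xs : List String) (a b : Int) (ha : 0 ≤ a) (hb : 0 ≤ b) :
    PySem.List.slice (x :: xs) (some (a + 1)) (some (b + 1)) = PySem.List.slice xs (some a) (some b) := by
  rw [PySem.List.slice_toNat _ (by omega) (by omega), PySem.List.slice_toNat _ ha hb]
  have h1 : (a + 1).toNat = a.toNat + 1 := by omega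
  have h2 : (b + 1).toNat = b.toNat + 1 := by omega
  rw [h1, h2]
  simp [Nat.succ_sub_succ]

theorem pv_shiftFold (x : String) (xs : List String) (bs : List Int) (h : ∀ b ∈ bs, 0 ≤ b)
    (acc : List String) (p : Int) (hp : -1 ≤ p) :
    ((bs.map (· + 1)).foldl (pvStepB (x :: xs)) (acc, p + 1)).1
      = (bs.foldl (pvStepB xs) (acc, p)).1 := by
  induction bs generalizing acc p with
  | nil => rfl
  | cons b bs ih =>
    have hb0 : 0 ≤ b := h b (by simp)
    simp only [List.map_cons, List.foldl_cons, pvStepB]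
    rw [pv_sliceShift x xs (p + 1) (b + 1) (by omega) (by omega)]
    exact ih (fun c hc => h c (by simp [hc])) _ b (by omega)

theorem pv_slice_head (x : String) (xs : List String) (b : Int) (hb : 0 ≤ b) :
    PySem.List.slice (x :: xs) (some (0 : Int)) (some (b + 1 + 1))
      = x :: PySem.List.slice xs (some (0 : Int)) (some (b + 1)) := by
  rw [PySem.List.slice_toNat _ (by omega) (by omega), PySem.List.slice_toNat _ (by omega) (by omega)]
  have h2 : (b + 1 + 1).toNat = (b + 1).toNat + 1 := by omega
  rw [h2]
  simp [List.take_succ_cons]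

def pvB (xs : List String) : List String := ((pvBnds xs 0).foldl (pvStepB xs) ([], -1)).1

theorem pv_pvB_eq_G (xs : List String) : pvB xs = pvG xs := by
  induction xs with
  | nil => rfl
  | cons x xs ih =>
    have hshift : pvBnds xs 1 = (pvBnds xs 0).map (· + 1) := pvBnds_shift xs 0
    have hnn : ∀ b ∈ pvBnds xs 0, 0 ≤ b := fun b hb => pvBnds_nonneg xs 0 b hb
    by_cases h : PySem.Str.len x ≤ 59
    · -- head line is short: it terminates its own group [x]
      have h' : x.length ≤ 59 := by simpa using h
      have hbnds : pvBnds (x :: xs) 0 = 0 :: (pvBnds xs 0).map (· + 1) := by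
        rw [pvBnds_cons, show ((0 : Int) + 1) = 1 from rfl, hshift]
        simp [h']
      rw [pvB, hbnds]
      simp only [List.foldl_cons, pvStepB, List.nil_append]
      have hx : PySem.Str.join ""
          (PySem.List.slice (x :: xs) (some ((-1 : Int) + 1)) (some ((0 : Int) + 1))) = x := by
        rw [show ((-1 : Int) + 1) = 0 from rfl, show ((0 : Int) + 1) = 1 from rfl]
        rw [PySem.List.slice_toNat _ (by omega) (by omega)]
        exact pv_join_singleton x
      rw [hx]
      have hsf := pv_shiftFold x xs (pvBnds xs 0) hnn [x] (-1) (by norm_num)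
      norm_num at hsf
      rw [hsf, pv_foldB_acc]
      rw [show ((pvBnds xs 0).foldl (pvStepB xs) ([], -1)).1 = pvB xs from rfl, ih]
      simp [pvG, h']
    · -- head line is long: it is prefixed onto the first group of the rest (if any)
      have h' : ¬ x.length ≤ 59 := by simpa using h
      have hbnds : pvBnds (x :: xs) 0 = (pvBnds xs 0).map (· + 1) := by
        rw [pvBnds_cons, show ((0 : Int) + 1) = 1 from rfl, hshift]
        simp [h']
      rw [pvB, hbnds]
      cases hb : pvBnds xs 0 with
      | nil =>
        have h0 : pvB xs = [] := by rw [pvB, hb]; rfl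
        simp only [pvG, if_neg h, ← ih, h0]
        rfl
      | cons b bs =>
        have hb0 : 0 ≤ b := hnn b (by rw [hb]; simp)
        have hbs : ∀ c ∈ bs, 0 ≤ c := fun c hc => hnn c (by rw [hb]; simp [hc])
        simp only [List.map_cons, List.foldl_cons, pvStepB, List.nil_append]
        have hx : PySem.Str.join ""
            (PySem.List.slice (x :: xs) (some ((-1 : Int) + 1)) (some (b + 1 + 1)))
            = x ++ PySem.Str.join "" (PySem.List.slice xs (some (0 : Int)) (some (b + 1))) := by
          rw [show ((-1 : Int) + 1) = 0 from rfl, pv_slice_head x xs b hb0, pv_join_cons]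
        rw [hx]
        have hsf : (((bs.map (· + 1)).foldl (pvStepB (x :: xs))
              ([x ++ PySem.Str.join "" (PySem.List.slice xs (some (0 : Int)) (some (b + 1)))],
               b + 1)).1)
            = (bs.foldl (pvStepB xs)
              ([x ++ PySem.Str.join "" (PySem.List.slice xs (some (0 : Int)) (some (b + 1)))],
               b)).1 :=
          pv_shiftFold x xs bs hbs _ b (by omega)
        rw [hsf, pv_foldB_acc]
        have hRest : pvB xs
            = PySem.Str.join "" (PySem.List.slice xs (some (0 : Int)) (some (b + 1)))
              :: (bs.foldl (pvStepB xs) ([], b)).1 := by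
          rw [pvB, hb]
          simp only [List.foldl_cons, pvStepB, List.nil_append]
          have h01 : ((((-1 : Int) + 1)) : Int) = 0 := rfl
          rw [h01, pv_foldB_acc]
          rfl
        simp only [pvG, if_neg h, ← ih, hRest]
        simp

theorem pv_B_eq_G (xs : List String) : getCorrectSeq_alt xs = pvG xs := by
  rw [show getCorrectSeq_alt xs = pvB xs from rfl]
  exact pv_pvB_eq_G xs

-- ===== VERDICT (by name: the statement is the Claim_ definition above) =====
theorem getCorrectSeq_spec : Claim_equal_getCorrectSeq := by
  intro seqList _
  unfold Spec_getCorrectSeq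
  rw [pv_A_eq_G, pv_B_eq_G]
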